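-- pv_equiv track=rewrite | github.com/H-B-P/d-and-d-sci-Turtles | update.py | best_prediction
-- ===== SOURCE A (Python) =====
-- def weights_to_mean_payout(weightDist, prediction):
--  payout = 0
--  for weight in weightDist:
--   if weight<=prediction:
--    payout+= weightDist[weight]*(200-(prediction-weight))
--   else:
--    payout+= weightDist[weight]*(200-(weight-prediction)*8)
--  return payout
--
-- def best_prediction(weightDist):
--  bestPred=0
--  bestPayout=0
--  for prediction in range(2000):
--   payout = weights_to_mean_payout(weightDist, prediction)
--   if payout>bestPayout:
--    bestPred = prediction
--    bestPayout = payout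
--  return bestPred, bestPayout
-- ===== SOURCE B (Python) =====
-- def best_prediction(weightDist):
--     # One pass builds totals and a "delta" table; each prediction's payout is
--     # then updated in O(1) via payout(p) = payout(p-1) + 8*total - 9*sle(p-1).
--     total = 0     # sum of all counts
--     payout = 0    # payout at prediction 0
--     sle = 0       # sum of counts with weight <= 0
--     delta = {}    # counts that switch to the "<= prediction" side at step p
--     for w in weightDist:
--         c = weightDist[w]
--         total += c
--         if w <= 0:
--             payout += c * (200 + w)
--             sle += c
--         else:
--             payout += c * (200 - 8 * w)
--             if w < 2000:
--                 delta[w] = delta.get(w, 0) + c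
--     bestPred, bestPayout = 0, 0
--     if payout > 0:
--         bestPred, bestPayout = 0, payout
--     for p in range(1, 2000):
--         payout += 8 * total - 9 * sle
--         sle += delta.get(p, 0)
--         if payout > bestPayout:
--             bestPred, bestPayout = p, payout
--     return bestPred, bestPayout
-- ===== Notes on version B (the rewrite author's own statement) =====
-- stated objective: faster
-- what changed: Instead of re-summing the whole distribution for each of the 2000 candidate predictions, B makes one pass building the total count, the payout at prediction 0, the count of weights <= 0 and a per-weight delta table, then updates each successive prediction's payout in O(1) via payout(p) = payout(p-1) + 8*total - 9*sle(p-1).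
import Mathlib
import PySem

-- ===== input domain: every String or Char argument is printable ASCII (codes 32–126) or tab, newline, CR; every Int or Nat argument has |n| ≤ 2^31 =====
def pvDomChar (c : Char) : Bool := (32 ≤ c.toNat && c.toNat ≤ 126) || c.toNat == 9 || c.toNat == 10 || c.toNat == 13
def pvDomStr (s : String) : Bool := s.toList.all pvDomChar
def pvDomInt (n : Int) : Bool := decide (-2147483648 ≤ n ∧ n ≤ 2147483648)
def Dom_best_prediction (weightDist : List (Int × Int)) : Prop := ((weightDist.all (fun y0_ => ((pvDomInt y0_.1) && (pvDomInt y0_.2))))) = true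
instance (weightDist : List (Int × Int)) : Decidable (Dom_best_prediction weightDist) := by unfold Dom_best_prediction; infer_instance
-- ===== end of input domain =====

-- B replaces A's 2000 full passes over the distribution by one pass plus an O(1)
-- incremental payout update per candidate prediction (objective: faster).
-- weightDist is a Python dict, modelled as an association list (first match wins);
-- 'weightDist[w]' for a key w taken from the dict itself always succeeds, so it is
-- ported as a first-match lookup with (unreachable) default 0.

-- ===== PORT A =====
-- first-match value lookup, as Python's weightDist[weight] for an iterated key
def lkup (weightDist : List (Int × Int)) (k : Int) : Int :=
  (PySem.Dict.mk weightDist).getD k 0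

def weights_to_mean_payout (weightDist : List (Int × Int)) (prediction : Int) : Int :=
  weightDist.foldl
    (fun payout kv =>
      if kv.1 ≤ prediction then
        payout + lkup weightDist kv.1 * (200 - (prediction - kv.1))
      else
        payout + lkup weightDist kv.1 * (200 - (kv.1 - prediction) * 8))
    0

def best_prediction (weightDist : List (Int × Int)) : Int × Int :=
  (PySem.List.pyRange 0 2000 1).foldl
    (fun (st : Int × Int) prediction =>
      let payout := weights_to_mean_payout weightDist prediction
      if payout > st.2 then (prediction, payout) else st)
    (0, 0)

-- ===== PORT B =====
def best_prediction_alt (weightDist : List (Int × Int)) : Int × Int :=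
  -- one pass: total count, payout at prediction 0, count of weights ≤ 0, delta table
  let s := weightDist.foldl
    (fun (st : Int × Int × Int × PySem.Dict Int Int) kv =>
      let w := kv.1
      let c := lkup weightDist w
      if w ≤ 0 then
        (st.1 + c, st.2.1 + c * (200 + w), st.2.2.1 + c, st.2.2.2)
      else
        (st.1 + c, st.2.1 + c * (200 - 8 * w), st.2.2.1,
          if w < 2000 then st.2.2.2.modify w 0 (· + c) else st.2.2.2))
    (0, 0, 0, PySem.Dict.empty)
  let total := s.1
  let payout0 := s.2.1
  let sle0 := s.2.2.1
  let delta := s.2.2.2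
  let st0 : Int × Int := if payout0 > 0 then (0, payout0) else (0, 0)
  let r := (PySem.List.pyRange 1 2000 1).foldl
    (fun (st : (Int × Int) × Int × Int) p =>
      let payout := st.2.1 + 8 * total - 9 * st.2.2
      let sle := st.2.2 + delta.getD p 0
      (if payout > st.1.2 then (p, payout) else st.1, payout, sle))
    (st0, payout0, sle0)
  r.1

-- ===== PRECONDITION & SPEC =====
def Spec_best_prediction (weightDist : List (Int × Int)) (out : Int × Int) : Prop := out = best_prediction_alt weightDist
instance (weightDist : List (Int × Int)) (out : Int × Int) : Decidable (Spec_best_prediction weightDist out) := by unfold Spec_best_prediction; infer_instance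

-- ===== CLAIM (what is proved, stated in full; the proofs are below) =====
def Claim_equal_best_prediction : Prop := ∀ (weightDist : List (Int × Int)), Dom_best_prediction weightDist → Spec_best_prediction weightDist (best_prediction weightDist)

-- ===== LEMMAS AND PROOFS =====

-- per-pair payout term of A, abstracted over the lookup function v
def tm (v : Int → Int) (p : Int) (kv : Int × Int) : Int :=
  if kv.1 ≤ p then v kv.1 * (200 - (p - kv.1)) else v kv.1 * (200 - (kv.1 - p) * 8)

def Ssum (v : Int → Int) (l : List (Int × Int)) (p : Int) : Int := (l.map (tm v p)).sum
def Tsum (v : Int → Int) (l : List (Int × Int)) : Int := (l.map (fun kv => v kv.1)).sum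
def Lsum (v : Int → Int) (l : List (Int × Int)) (p : Int) : Int :=
  (l.map (fun kv => if kv.1 ≤ p then v kv.1 else 0)).sum

-- the delta table B builds, as a standalone fold
def deltaD (wd : List (Int × Int)) : PySem.Dict Int Int :=
  wd.foldl (fun d kv => if ¬ kv.1 ≤ 0 ∧ kv.1 < 2000 then d.modify kv.1 0 (· + lkup wd kv.1) else d)
    PySem.Dict.empty

theorem foldA_add (v : Int → Int) (l : List (Int × Int)) (p a : Int) :
    l.foldl
      (fun payout kv =>
        if kv.1 ≤ p then payout + v kv.1 * (200 - (p - kv.1))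
        else payout + v kv.1 * (200 - (kv.1 - p) * 8)) a
      = a + Ssum v l p := by
  induction l generalizing a with
  | nil => simp [Ssum]
  | cons kv l ih =>
    simp only [List.foldl_cons, ih, Ssum, List.map_cons, List.sum_cons, tm]
    split_ifs <;> ring

theorem w2mp_eq_Ssum (wd : List (Int × Int)) (p : Int) :
    weights_to_mean_payout wd p = Ssum (lkup wd) wd p := by
  have h := foldA_add (lkup wd) wd p 0
  simpa [weights_to_mean_payout] using h

theorem tm_succ (v : Int → Int) (p : Int) (kv : Int × Int) :
    tm v (p + 1) kv = tm v p kv + 8 * v kv.1 - 9 * (if kv.1 ≤ p then v kv.1 else 0) := by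
  unfold tm
  split_ifs with h1 h2 h2
  · ring
  · have : kv.1 = p + 1 := by omega
    rw [this]; ring
  · omega
  · ring

-- the incremental recurrence: payout(p+1) = payout(p) + 8*total - 9*sle(p)
theorem Ssum_succ (v : Int → Int) (l : List (Int × Int)) (p : Int) :
    Ssum v l (p + 1) = Ssum v l p + 8 * Tsum v l - 9 * Lsum v l p := by
  induction l with
  | nil => simp [Ssum, Tsum, Lsum]
  | cons kv l ih =>
    simp only [Ssum, Tsum, Lsum, List.map_cons, List.sum_cons] at *
    rw [tm_succ]
    linarith

-- sle step: crossing p adds exactly the counts of weight p (for 1 ≤ p < 2000)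
theorem Lsum_succ (v : Int → Int) (l : List (Int × Int)) (p : Int) (hp : 1 ≤ p) (hp2 : p < 2000) :
    Lsum v l p = Lsum v l (p - 1) +
      (l.map (fun kv => if ¬ kv.1 ≤ 0 ∧ kv.1 < 2000 ∧ kv.1 = p then v kv.1 else 0)).sum := by
  induction l with
  | nil => simp [Lsum]
  | cons kv l ih =>
    simp only [Lsum, List.map_cons, List.sum_cons] at *
    have hkv : (if kv.1 ≤ p then v kv.1 else 0)
        = (if kv.1 ≤ p - 1 then v kv.1 else 0)
          + (if ¬ kv.1 ≤ 0 ∧ kv.1 < 2000 ∧ kv.1 = p then v kv.1 else 0) := by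
      split_ifs <;> omega
    linarith [hkv]

-- delta dict characterisation
theorem delta_getD (v : Int → Int) (l : List (Int × Int)) (d : PySem.Dict Int Int) (q : Int) :
    ((l.foldl (fun d kv => if ¬ kv.1 ≤ 0 ∧ kv.1 < 2000 then d.modify kv.1 0 (· + v kv.1) else d) d).getD q 0)
      = d.getD q 0 + (l.map (fun kv => if ¬ kv.1 ≤ 0 ∧ kv.1 < 2000 ∧ kv.1 = q then v kv.1 else 0)).sum := by
  induction l generalizing d with
  | nil => simp
  | cons kv l ih =>
    simp only [List.foldl_cons, List.map_cons, List.sum_cons]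
    by_cases h : ¬ kv.1 ≤ 0 ∧ kv.1 < 2000
    · obtain ⟨h1, h2⟩ := h
      rw [if_pos ⟨h1, h2⟩, ih, PySem.Dict.getD_modify]
      by_cases hq : q = kv.1
      · rw [if_pos hq, if_pos ⟨h1, h2, hq.symm⟩, hq]; ring
      · rw [if_neg hq, if_neg (fun hc => hq hc.2.2.symm)]; ring
    · rw [if_neg h, ih, if_neg (fun hc => h ⟨hc.1, hc.2.1⟩)]; ring

-- phase 1 of B computes (total, payout(0), sle(0), delta)
theorem phase1_eq (wd l : List (Int × Int)) (st : Int × Int × Int × PySem.Dict Int Int) :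
    l.foldl
      (fun (st : Int × Int × Int × PySem.Dict Int Int) kv =>
        let w := kv.1
        let c := lkup wd w
        if w ≤ 0 then
          (st.1 + c, st.2.1 + c * (200 + w), st.2.2.1 + c, st.2.2.2)
        else
          (st.1 + c, st.2.1 + c * (200 - 8 * w), st.2.2.1,
            if w < 2000 then st.2.2.2.modify w 0 (· + c) else st.2.2.2)) st
    = (st.1 + Tsum (lkup wd) l,
       st.2.1 + Ssum (lkup wd) l 0,
       st.2.2.1 + Lsum (lkup wd) l 0,
       l.foldl (fun d kv => if ¬ kv.1 ≤ 0 ∧ kv.1 < 2000 then d.modify kv.1 0 (· + lkup wd kv.1) else d) st.2.2.2) := by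
  induction l generalizing st with
  | nil => simp [Tsum, Ssum, Lsum]
  | cons kv l ih =>
    simp only [List.foldl_cons, Tsum, Ssum, Lsum, List.map_cons, List.sum_cons]
    by_cases h : kv.1 ≤ 0
    · rw [if_pos h, ih,
        if_neg (show ¬(¬ kv.1 ≤ 0 ∧ kv.1 < 2000) from fun hc => hc.1 h)]
      have htm : tm (lkup wd) 0 kv = lkup wd kv.1 * (200 + kv.1) := by
        unfold tm; rw [if_pos h]; ring
      simp [Prod.ext_iff, Tsum, Ssum, Lsum, htm, h]
      and_intros <;> ring
    · rw [if_neg h, ih]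
      have htm : tm (lkup wd) 0 kv = lkup wd kv.1 * (200 - 8 * kv.1) := by
        unfold tm; rw [if_neg h]; ring
      have hd : (if ¬ kv.1 ≤ 0 ∧ kv.1 < 2000 then st.2.2.2.modify kv.1 0 (· + lkup wd kv.1) else st.2.2.2)
          = (if kv.1 < 2000 then st.2.2.2.modify kv.1 0 (· + lkup wd kv.1) else st.2.2.2) := by
        by_cases h2 : kv.1 < 2000
        · rw [if_pos ⟨h, h2⟩, if_pos h2]
        · rw [if_neg (fun hc => h2 hc.2), if_neg h2]
      rw [hd]
      simp [Prod.ext_iff, Tsum, Ssum, Lsum, htm, h]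
      and_intros <;> ring

-- B's sweep computes the same best as A's per-prediction scan
theorem main_loop (wd : List (Int × Int)) (n : Nat) :
    ∀ (p : Int) (st : Int × Int) (pay sle : Int),
    1 ≤ p → p + n = 2000 →
    pay = Ssum (lkup wd) wd (p - 1) → sle = Lsum (lkup wd) wd (p - 1) →
    ((PySem.List.pyRange p 2000 1).foldl
      (fun (st : (Int × Int) × Int × Int) q =>
        let payout := st.2.1 + 8 * Tsum (lkup wd) wd - 9 * st.2.2
        let sle := st.2.2 + (deltaD wd).getD q 0
        (if payout > st.1.2 then (q, payout) else st.1, payout, sle))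
      (st, pay, sle)).1
    = (PySem.List.pyRange p 2000 1).foldl
      (fun (st : Int × Int) prediction =>
        let payout := weights_to_mean_payout wd prediction
        if payout > st.2 then (prediction, payout) else st) st := by
  induction n with
  | zero =>
    intro p st pay sle hp hpn hpay hsle
    have : (2000 : Int) ≤ p := by omega
    rw [PySem.List.pyRange_one_eq_nil this]
    simp
  | succ n ih =>
    intro p st pay sle hp hpn hpay hsle
    have hlt : p < 2000 := by omega
    rw [PySem.List.pyRange_one_cons hlt]
    simp only [List.foldl_cons]
    have hpay' : pay + 8 * Tsum (lkup wd) wd - 9 * sle = Ssum (lkup wd) wd p := by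
      rw [hpay, hsle]
      have := Ssum_succ (lkup wd) wd (p - 1)
      have hpp : p - 1 + 1 = p := by ring
      rw [hpp] at this
      linarith
    have hsle' : sle + (deltaD wd).getD p 0 = Lsum (lkup wd) wd p := by
      rw [hsle, deltaD, delta_getD, PySem.Dict.getD_empty]
      have := Lsum_succ (lkup wd) wd p hp hlt
      linarith
    have hw : weights_to_mean_payout wd p = pay + 8 * Tsum (lkup wd) wd - 9 * sle := by
      rw [w2mp_eq_Ssum, hpay']
    simp only [hw]
    have hrec := ih (p + 1) (if pay + 8 * Tsum (lkup wd) wd - 9 * sle > st.2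
        then (p, pay + 8 * Tsum (lkup wd) wd - 9 * sle) else st)
      (pay + 8 * Tsum (lkup wd) wd - 9 * sle) (sle + (deltaD wd).getD p 0)
      (by omega) (by omega)
      (by rw [hpay']; congr 1; ring)
      (by rw [hsle']; congr 1; ring)
    exact hrec

-- ===== VERDICT (by name: the statement is the Claim_ definition above) =====
theorem best_prediction_spec : Claim_equal_best_prediction := by
  intro wd _
  unfold Spec_best_prediction best_prediction best_prediction_alt
  rw [phase1_eq]
  rw [PySem.List.pyRange_one_cons (by norm_num : (0:Int) < 2000)]
  simp only [List.foldl_cons, zero_add]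
  rw [show weights_to_mean_payout wd 0 = Ssum (lkup wd) wd 0 from w2mp_eq_Ssum wd 0]
  exact (main_loop wd 1999 1
      (if Ssum (lkup wd) wd 0 > 0 then (0, Ssum (lkup wd) wd 0) else (0, 0))
      (Ssum (lkup wd) wd 0) (Lsum (lkup wd) wd 0)
      (by norm_num) (by norm_num) (by norm_num) (by norm_num)).symm
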